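-- pv_equiv track=rewrite | github.com/malininv/Profiles_Filler | profile_importer.py | _split_hardware_blocks
-- ===== SOURCE A (Python) =====
-- def _strip_trailing_empty(parts: list[str]) -> list[str]:
--     while parts and parts[-1] == "":
--         parts.pop()
--     return parts
--
-- def _split_hardware_blocks(lines: list[str]) -> list[list[list[str]]]:
--     blocks: list[list[list[str]]] = []
--     current: list[list[str]] | None = None
--     for line in lines:
--         row = _strip_trailing_empty([part.strip() for part in line.split(";")])
--         if not row:
--             continue
--         tag = row[0].strip().upper()
--         if tag == "<GOST>":
--             if current:
--                 blocks.append(current)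
--             current = [row]
--             continue
--         if current is not None:
--             current.append(row)
--     if current:
--         blocks.append(current)
--     return blocks
-- ===== SOURCE B (Python) =====
-- def _split_hardware_blocks(lines: list[str]) -> list[list[list[str]]]:
--     rows: list[list[str]] = []
--     for line in lines:
--         row = [part.strip() for part in line.split(";")]
--         while row and row[-1] == "":
--             row.pop()
--         if row:
--             rows.append(row)
--     starts = [i for i, row in enumerate(rows) if row[0].strip().upper() == "<GOST>"]
--     return [rows[s:e] for s, e in zip(starts, starts[1:] + [len(rows)])]
-- ===== Notes on version B (the rewrite author's own statement) =====
-- stated objective: alternative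
-- what changed: Replaces A's incremental blocks/current accumulator-and-flag loop with three phases: filter lines into processed rows, collect the indices of <GOST> boundary rows, and slice rows between consecutive boundaries.
import Mathlib
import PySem

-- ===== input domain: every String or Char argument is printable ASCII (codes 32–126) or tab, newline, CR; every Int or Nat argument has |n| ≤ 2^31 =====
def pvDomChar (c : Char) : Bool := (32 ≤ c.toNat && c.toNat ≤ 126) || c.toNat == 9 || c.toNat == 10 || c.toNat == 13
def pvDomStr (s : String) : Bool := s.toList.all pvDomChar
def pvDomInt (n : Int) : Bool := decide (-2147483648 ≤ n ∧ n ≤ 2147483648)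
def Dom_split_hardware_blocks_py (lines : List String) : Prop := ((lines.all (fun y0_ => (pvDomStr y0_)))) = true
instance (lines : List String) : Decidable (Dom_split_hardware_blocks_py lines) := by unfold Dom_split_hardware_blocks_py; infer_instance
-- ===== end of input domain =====

-- B replaces A's incremental blocks/current accumulator loop by three phases (filter rows,
-- collect <GOST> boundary indices, slice between consecutive boundaries); same cost, alternative structure.

-- ===== PORT A =====
-- while parts and parts[-1] == "": parts.pop()   (drop trailing empty strings)
def stripTrailingEmpty : List String → List String
  | [] => []
  | p :: ps =>
    match stripTrailingEmpty ps with
    | [] => if p = "" then [] else [p]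
    | r :: rs => p :: r :: rs

-- row = _strip_trailing_empty([part.strip() for part in line.split(";")])
def pvRow (line : String) : List String :=
  -- line.split(";"): split? is 'some' here since the separator ";" is nonempty
  stripTrailingEmpty (((PySem.Str.split? line ";").getD []).map PySem.Str.strip)

-- row[0].strip().upper() == "<GOST>"  (row nonempty at every use; headD "" exact there)
def pvIsGost (row : List String) : Bool :=
  PySem.Str.upper (PySem.Str.strip (row.headD "")) == "<GOST>"

-- one iteration of A's for-loop, state = (blocks, current)
def pvStepA (s : List (List (List String)) × Option (List (List String))) (line : String) :
    List (List (List String)) × Option (List (List String)) :=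
  let row := pvRow line
  if row = [] then s
  else if pvIsGost row then
    match s.2 with
    | some c => if c = [] then (s.1, some [row]) else (s.1 ++ [c], some [row])
    | none => (s.1, some [row])
  else
    match s.2 with
    | some c => (s.1, some (c ++ [row]))
    | none => s

-- trailing 'if current: blocks.append(current)'
def pvFinalA (s : List (List (List String)) × Option (List (List String))) :
    List (List (List String)) :=
  match s.2 with
  | some c => if c = [] then s.1 else s.1 ++ [c]
  | none => s.1

def split_hardware_blocks_py (lines : List String) : List (List (List String)) :=
  pvFinalA (lines.foldl pvStepA ([], none))

-- ===== PORT B =====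
def split_hardware_blocks_py_alt (lines : List String) : List (List (List String)) :=
  let rows := lines.foldl (fun acc line =>
      let row := pvRow line
      if row = [] then acc else acc ++ [row]) []
  let starts := (PySem.List.enumerate rows).filterMap
      (fun p => if pvIsGost p.2 then some p.1 else none)
  (starts.zip (starts.drop 1 ++ [(rows.length : Int)])).map
      (fun p => PySem.List.slice rows (some p.1) (some p.2))

-- ===== PRECONDITION & SPEC =====
def Spec_split_hardware_blocks_py (lines : List String) (out : List (List (List String))) : Prop := out = split_hardware_blocks_py_alt lines
instance (lines : List String) (out : List (List (List String))) : Decidable (Spec_split_hardware_blocks_py lines out) := by unfold Spec_split_hardware_blocks_py; infer_instance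

-- ===== CLAIM (what is proved, stated in full; the proofs are below) =====
def Claim_equal_split_hardware_blocks_py : Prop := ∀ (lines : List String), Dom_split_hardware_blocks_py lines → Spec_split_hardware_blocks_py lines (split_hardware_blocks_py lines)

-- ===== LEMMAS AND PROOFS =====

-- the processed nonempty rows, as a filterMap
def pvRowsOf (lines : List String) : List (List String) :=
  lines.filterMap (fun line => let row := pvRow line; if row = [] then none else some row)

-- one iteration of A's loop on an (already nonempty) row
def pvStepRow (s : List (List (List String)) × Option (List (List String))) (row : List String) :
    List (List (List String)) × Option (List (List String)) :=
  if pvIsGost row then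
    match s.2 with
    | some c => if c = [] then (s.1, some [row]) else (s.1 ++ [c], some [row])
    | none => (s.1, some [row])
  else
    match s.2 with
    | some c => (s.1, some (c ++ [row]))
    | none => s

-- canonical grouping both ports compute
def pvGroup : Option (List (List String)) → List (List String) → List (List (List String))
  | none, [] => []
  | some c, [] => [c]
  | none, r :: rs => if pvIsGost r then pvGroup (some [r]) rs else pvGroup none rs
  | some c, r :: rs => if pvIsGost r then c :: pvGroup (some [r]) rs else pvGroup (some (c ++ [r])) rs

-- Nat-level boundary indices
def pvStarts : List (List String) → List Nat
  | [] => []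
  | r :: rs => if pvIsGost r then 0 :: (pvStarts rs).map (· + 1) else (pvStarts rs).map (· + 1)

-- Nat-level form of B's slice phase
def pvBn (rows : List (List String)) : List (List (List String)) :=
  ((pvStarts rows).zip ((pvStarts rows).drop 1 ++ [rows.length])).map
    (fun p => (rows.drop p.1).take (p.2 - p.1))

lemma pvGroup_none_nil : pvGroup none [] = [] := rfl
lemma pvGroup_some_nil (c : List (List String)) : pvGroup (some c) [] = [c] := rfl
lemma pvGroup_none_cons (r : List String) (rs : List (List String)) :
    pvGroup none (r :: rs) = if pvIsGost r then pvGroup (some [r]) rs else pvGroup none rs := rfl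
lemma pvGroup_some_cons (c : List (List String)) (r : List String) (rs : List (List String)) :
    pvGroup (some c) (r :: rs)
      = if pvIsGost r then c :: pvGroup (some [r]) rs else pvGroup (some (c ++ [r])) rs := rfl
lemma pvStarts_nil : pvStarts [] = [] := rfl
lemma pvStarts_cons (r : List String) (rs : List (List String)) :
    pvStarts (r :: rs)
      = if pvIsGost r then 0 :: (pvStarts rs).map (· + 1) else (pvStarts rs).map (· + 1) := rfl

lemma foldl_stepA_eq (lines : List String) :
    ∀ s, lines.foldl pvStepA s = (pvRowsOf lines).foldl pvStepRow s := by
  induction lines with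
  | nil => intro s; rfl
  | cons l ls ih =>
    intro s
    by_cases h : pvRow l = []
    · simp [pvRowsOf, h, pvStepA, ih, pvRowsOf]
    · simp [pvRowsOf, h, pvStepA, pvStepRow, ih, pvRowsOf]

lemma loopA_eq (rows : List (List String)) :
    ∀ (blocks : List (List (List String))) (cur : Option (List (List String))),
      (∀ c, cur = some c → c ≠ []) →
      pvFinalA (rows.foldl pvStepRow (blocks, cur)) = blocks ++ pvGroup cur rows := by
  induction rows with
  | nil =>
    intro blocks cur h
    match cur with
    | none => simp [pvFinalA, pvGroup_none_nil]
    | some c => simp [pvFinalA, pvGroup_some_nil, h c rfl]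
  | cons r rs ih =>
    intro blocks cur h
    match cur with
    | none =>
      cases hg : pvIsGost r with
      | true => simpa [pvStepRow, hg, pvGroup_none_cons] using ih blocks (some [r]) (by simp)
      | false => simpa [pvStepRow, hg, pvGroup_none_cons] using ih blocks none (by simp)
    | some c =>
      have hc : c ≠ [] := h c rfl
      cases hg : pvIsGost r with
      | true =>
        have := ih (blocks ++ [c]) (some [r]) (by simp)
        simpa [pvStepRow, hg, pvGroup_some_cons, hc, List.append_assoc] using this
      | false =>
        have := ih blocks (some (c ++ [r])) (by simp)
        simpa [pvStepRow, hg, pvGroup_some_cons, hc] using this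

lemma A_eq_group (lines : List String) :
    split_hardware_blocks_py lines = pvGroup none (pvRowsOf lines) := by
  unfold split_hardware_blocks_py
  rw [foldl_stepA_eq]
  simpa using loopA_eq (pvRowsOf lines) [] none (by simp)

lemma foldl_rows_eq (lines : List String) :
    ∀ acc, lines.foldl (fun acc line =>
      let row := pvRow line
      if row = [] then acc else acc ++ [row]) acc = acc ++ pvRowsOf lines := by
  induction lines with
  | nil => intro acc; simp [pvRowsOf]
  | cons l ls ih =>
    intro acc
    by_cases h : pvRow l = []
    · simp [pvRowsOf, h, ih, pvRowsOf]
    · simp [pvRowsOf, h, ih, pvRowsOf, List.append_assoc]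

lemma starts_cast (rows : List (List String)) :
    ∀ s : Int, (PySem.List.enumerate rows s).filterMap
        (fun p => if pvIsGost p.2 then some p.1 else none)
      = (pvStarts rows).map (fun k : Nat => s + (k : Int)) := by
  induction rows with
  | nil => intro s; simp [PySem.List.enumerate_nil, pvStarts_nil]
  | cons r rs ih =>
    intro s
    rw [PySem.List.enumerate_cons, pvStarts_cons]
    cases hg : pvIsGost r with
    | true =>
      simp only [List.filterMap_cons, hg, if_true, ih (s + 1), List.map_cons, List.map_map]
      refine congrArg₂ List.cons (by norm_num) (List.map_congr_left fun k _ => ?_)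
      simp only [Function.comp_apply]
      push_cast
      ring
    | false =>
      simp only [List.filterMap_cons, hg, Bool.false_eq_true, if_false, ih (s + 1),
        List.map_map]
      refine List.map_congr_left fun k _ => ?_
      simp only [Function.comp_apply]
      push_cast
      ring

lemma noStarts_group (rs : List (List String)) :
    ∀ c, pvStarts rs = [] → pvGroup (some c) rs = [c ++ rs] := by
  induction rs with
  | nil => intro c _; simp [pvGroup_some_nil]
  | cons r rs ih =>
    intro c h
    rw [pvStarts_cons] at h
    by_cases hg : pvIsGost r
    · rw [if_pos hg] at h; simp at h
    · rw [if_neg hg, List.map_eq_nil_iff] at h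
      rw [pvGroup_some_cons, if_neg hg, ih (c ++ [r]) h]
      simp

lemma noStarts_none (rs : List (List String)) :
    pvStarts rs = [] → pvGroup none rs = [] := by
  induction rs with
  | nil => intro _; rfl
  | cons r rs ih =>
    intro h
    rw [pvStarts_cons] at h
    by_cases hg : pvIsGost r
    · rw [if_pos hg] at h; simp at h
    · rw [if_neg hg, List.map_eq_nil_iff] at h
      rw [pvGroup_none_cons, if_neg hg, ih h]

lemma starts_cons_group (rs : List (List String)) :
    ∀ c k S, pvStarts rs = k :: S →
      pvGroup (some c) rs = (c ++ rs.take k) :: pvGroup none rs := by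
  induction rs with
  | nil => intro c k S h; simp [pvStarts_nil] at h
  | cons r rs ih =>
    intro c k S h
    rw [pvStarts_cons] at h
    by_cases hg : pvIsGost r
    · rw [if_pos hg] at h
      cases h
      rw [pvGroup_some_cons, if_pos hg, pvGroup_none_cons, if_pos hg]
      simp
    · rw [if_neg hg] at h
      cases hS : pvStarts rs with
      | nil => rw [hS] at h; simp at h
      | cons k₀ S₀ =>
        rw [hS, List.map_cons] at h
        cases h
        rw [pvGroup_some_cons, if_neg hg, pvGroup_none_cons, if_neg hg,
          ih (c ++ [r]) k₀ S₀ hS, List.take_succ_cons]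
        simp [List.append_assoc]

lemma zip_shift (S : List Nat) (n : Nat) :
    (S.map (· + 1)).zip ((S.map (· + 1)).drop 1 ++ [n + 1])
      = (S.zip (S.drop 1 ++ [n])).map (Prod.map (· + 1) (· + 1)) := by
  rw [← List.zip_map]
  congr 1
  simp

lemma zip_cons0 {α : Type} (a L : α) (A : List α) :
    (a :: A).zip (A ++ [L]) = (a, A.headD L) :: A.zip (A.drop 1 ++ [L]) := by
  cases A with
  | nil => rfl
  | cons x A' => rfl

lemma Bn_cons_not (r : List String) (rs : List (List String)) (hg : pvIsGost r = false) :
    pvBn (r :: rs) = pvBn rs := by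
  unfold pvBn
  rw [show pvStarts (r :: rs) = (pvStarts rs).map (· + 1) by
    rw [pvStarts_cons, if_neg (by simp [hg])]]
  rw [List.length_cons, zip_shift, List.map_map]
  exact List.map_congr_left fun p _ => by
    simp [Prod.map, Nat.add_sub_add_right]

lemma Bn_cons_gost (r : List String) (rs : List (List String)) (hg : pvIsGost r = true) :
    pvBn (r :: rs) = ((r :: rs).take ((pvStarts rs).headD rs.length + 1)) :: pvBn rs := by
  unfold pvBn
  rw [show pvStarts (r :: rs) = 0 :: (pvStarts rs).map (· + 1) by
    rw [pvStarts_cons, if_pos (by simp [hg])]]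
  rw [List.drop_succ_cons, List.drop_zero, List.length_cons, zip_cons0, List.map_cons]
  refine congrArg₂ List.cons ?_ ?_
  · cases hS : pvStarts rs with
    | nil => simp
    | cons k S => simp
  · rw [zip_shift, List.map_map]
    exact List.map_congr_left fun p _ => by
      simp [Prod.map, Nat.add_sub_add_right]

lemma Bn_eq_group (rows : List (List String)) : pvBn rows = pvGroup none rows := by
  induction rows with
  | nil => simp [pvBn, pvStarts_nil, pvGroup_none_nil]
  | cons r rs ih =>
    cases hg : pvIsGost r with
    | true =>
      rw [Bn_cons_gost r rs hg, ih]
      cases hS : pvStarts rs with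
      | nil =>
        simp only [List.headD_nil]
        rw [List.take_of_length_le (by simp)]
        simp [pvGroup_none_cons, hg, noStarts_group rs [r] hS, noStarts_none rs hS]
      | cons k S =>
        simp only [List.headD_cons, List.take_succ_cons]
        simp [pvGroup_none_cons, hg, starts_cons_group rs [r] k S hS]
    | false =>
      rw [Bn_cons_not r rs hg, ih]
      simp [pvGroup_none_cons, hg]

lemma B_eq_group (lines : List String) :
    split_hardware_blocks_py_alt lines = pvGroup none (pvRowsOf lines) := by
  unfold split_hardware_blocks_py_alt
  rw [foldl_rows_eq lines []]
  simp only [List.nil_append]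
  rw [starts_cast (pvRowsOf lines) 0, ← Bn_eq_group]
  simp only [zero_add]
  unfold pvBn
  rw [show ((pvStarts (pvRowsOf lines)).map (fun k : Nat => (k : Int))).drop 1
        ++ [((pvRowsOf lines).length : Int)]
        = ((pvStarts (pvRowsOf lines)).drop 1 ++ [(pvRowsOf lines).length]).map
            (fun k : Nat => (k : Int)) by simp [List.map_drop]]
  rw [List.zip_map, List.map_map]
  refine List.map_congr_left fun p _ => ?_
  simp [Prod.map, PySem.List.slice_natCast]

-- ===== VERDICT (by name: the statement is the Claim_ definition above) =====
theorem split_hardware_blocks_py_spec : Claim_equal_split_hardware_blocks_py := by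
  intro lines _
  unfold Spec_split_hardware_blocks_py
  rw [A_eq_group, B_eq_group]
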